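-- pv_equiv track=rewrite | github.com/jsripraj/ECE364-Lab03 | simpleTasks.py | getStreaks
-- ===== SOURCE A (Python) =====
-- def getStreaks(sequence, letters):
--     sequence = list(sequence)
--     letters = list(letters)
--     newSeq = []
--     seqs = []
--     n = 1
--     for letter in sequence:
--         if letters.count(letter) > 0:
--             newSeq.append(letter)
--             if n == len(sequence) or letter != sequence[n]:
--                 seqs.append("".join(newSeq))
--                 newSeq.clear()
--         n += 1
--     return seqs
-- ===== SOURCE B (Python) =====
-- def getStreaks(sequence, letters):
--     allowed = set(letters)
--     res = []
--     rest = list(sequence)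
--     while rest:
--         c = rest[0]
--         k = 1
--         while k < len(rest) and rest[k] == c:
--             k += 1
--         if c in allowed:
--             res.append(c * k)
--         rest = rest[k:]
--     return res
-- ===== Notes on version B (the rewrite author's own statement) =====
-- stated objective: faster
-- what changed: Replaces A's accumulator-plus-lookahead-index loop (with a linear letters.count membership test per character) by a set-based two-pointer scan that extracts each maximal run of equal characters directly.
import Mathlib
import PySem

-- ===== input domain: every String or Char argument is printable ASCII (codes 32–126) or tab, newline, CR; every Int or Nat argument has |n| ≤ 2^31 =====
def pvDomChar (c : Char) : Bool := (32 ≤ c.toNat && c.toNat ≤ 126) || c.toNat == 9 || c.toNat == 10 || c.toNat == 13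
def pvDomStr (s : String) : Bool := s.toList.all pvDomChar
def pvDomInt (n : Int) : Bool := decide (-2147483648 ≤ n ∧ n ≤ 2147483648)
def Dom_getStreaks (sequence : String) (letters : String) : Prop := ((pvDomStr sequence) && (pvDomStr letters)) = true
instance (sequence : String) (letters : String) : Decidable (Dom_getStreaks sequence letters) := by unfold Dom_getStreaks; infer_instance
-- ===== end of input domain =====

-- B replaces A's accumulator-plus-lookahead loop (an O(|letters|) count per character) by a
-- two-pointer scan over maximal equal runs with a set for membership; same return value.


-- ===== PORT A =====
-- for-loop → foldl over the state (newSeq, seqs, n); 'sequence[n]' is only evaluated with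
-- n < len (Python's short-circuit after 'n == len(sequence)'), ported as getD with an
-- irrelevant default — exact on every reachable index.
def getStreaks (sequence : String) (letters : String) : List String :=
  let seqList := sequence.toList
  let lettersList := letters.toList
  let st := seqList.foldl (fun (st : List Char × List String × Nat) letter =>
    let newSeq := st.1
    let seqs := st.2.1
    let n := st.2.2
    if PySem.List.count lettersList letter > 0 then
      let newSeq := newSeq ++ [letter]
      if n = seqList.length ∨ seqList.getD n letter ≠ letter then
        ([], seqs ++ [String.ofList newSeq], n + 1)
      else
        (newSeq, seqs, n + 1)
    else
      (newSeq, seqs, n + 1)) ([], [], 1)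
  st.2.1

-- ===== PORT B =====
-- inner while 'k = 1; while k < len(rest) and rest[k] == c: k += 1': k = 1 + run length in rest.tail
def pvRunLen (c : Char) : List Char → Nat
  | [] => 0
  | x :: xs => if x == c then 1 + pvRunLen c xs else 0

-- outer while 'while rest: … rest = rest[k:]' → recursion on rest; 'c * k' = replicate,
-- 'res.append' = cons onto the recursive tail
def pvAltGo (allowed : PySem.Set Char) : List Char → List String
  | [] => []
  | c :: rest =>
    let r := pvRunLen c rest
    let tail := pvAltGo allowed (rest.drop r)
    if PySem.Set.contains allowed c then String.ofList (List.replicate (1 + r) c) :: tail else tail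
termination_by l => l.length
decreasing_by simp only [List.length_cons, List.length_drop]; omega

def getStreaks_alt (sequence : String) (letters : String) : List String :=
  pvAltGo (PySem.Set.ofList letters.toList) sequence.toList

-- ===== PRECONDITION & SPEC =====
def Spec_getStreaks (sequence : String) (letters : String) (out : List String) : Prop := out = getStreaks_alt sequence letters
instance (sequence : String) (letters : String) (out : List String) : Decidable (Spec_getStreaks sequence letters out) := by unfold Spec_getStreaks; infer_instance

-- ===== CLAIM (what is proved, stated in full; the proofs are below) =====
def Claim_equal_getStreaks : Prop := ∀ (sequence : String) (letters : String), Dom_getStreaks sequence letters → Spec_getStreaks sequence letters (getStreaks sequence letters)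

-- ===== LEMMAS AND PROOFS =====

-- A's loop rewritten as a recursion over the remaining suffix: the lookahead sequence[n] is
-- the head of the suffix after the current letter, and n = len iff that suffix is empty.
def pvFA (lets : List Char) (newSeq : List Char) : List Char → List String
  | [] => []
  | c :: rest =>
    if PySem.List.count lets c > 0 then
      if rest = [] ∨ rest.headD c ≠ c then
        String.ofList (newSeq ++ [c]) :: pvFA lets [] rest
      else
        pvFA lets (newSeq ++ [c]) rest
    else
      pvFA lets newSeq rest

-- bridge: A's foldl with index state computes pvFA on the suffix
theorem pvFA_bridge (L lets : List Char) :
    ∀ (suffix : List Char) (i : Nat), suffix = L.drop i →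
    ∀ (ns : List Char) (acc : List String),
    (suffix.foldl (fun (st : List Char × List String × Nat) letter =>
      let newSeq := st.1
      let seqs := st.2.1
      let n := st.2.2
      if PySem.List.count lets letter > 0 then
        let newSeq := newSeq ++ [letter]
        if n = L.length ∨ L.getD n letter ≠ letter then
          ([], seqs ++ [String.ofList newSeq], n + 1)
        else
          (newSeq, seqs, n + 1)
      else
        (newSeq, seqs, n + 1)) (ns, acc, i + 1)).2.1
    = acc ++ pvFA lets ns suffix := by
  intro suffix
  induction suffix with
  | nil => intro i _ ns acc; simp [pvFA]
  | cons c rest ih =>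
    intro i hdrop ns acc
    have hlen : i < L.length := by
      by_contra h
      rw [List.drop_eq_nil_of_le (by omega)] at hdrop
      exact (List.cons_ne_nil c rest) hdrop
    have hrest : rest = L.drop (i + 1) := by
      have := congrArg List.tail hdrop
      simpa [List.tail_drop] using this
    have hnil : rest = [] ↔ i + 1 = L.length := by
      rw [hrest]
      constructor
      · intro h
        have := congrArg List.length h
        simp [List.length_drop] at this
        omega
      · intro h; exact List.drop_eq_nil_of_le (by omega)
    have hgetD : ∀ d : Char, rest ≠ [] → L.getD (i + 1) d = rest.headD d := by
      intro d hne
      rw [List.getD_eq_getElem?_getD, ← List.head?_drop, ← hrest]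
      cases rest with
      | nil => exact absurd rfl hne
      | cons a l => simp
    have hcond : (i + 1 = L.length ∨ L.getD (i + 1) c ≠ c) ↔ (rest = [] ∨ rest.headD c ≠ c) := by
      by_cases he : rest = []
      · simp [he, hnil.mp he]
      · have hg := hgetD c he
        rw [hg]
        constructor
        · rintro (h | h)
          · exact absurd (hnil.mpr h) he
          · exact Or.inr h
        · rintro (h | h)
          · exact absurd h he
          · exact Or.inr h
    simp only [List.foldl_cons]
    by_cases hc : c ∈ lets
    · have hcnt : PySem.List.count lets c > 0 := by
        simpa [PySem.List.count] using List.count_pos_iff.mpr hc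
      by_cases hcnd : rest = [] ∨ rest.headD c ≠ c
      · have hcnd' : i + 1 = L.length ∨ L.getD (i + 1) c ≠ c := hcond.mpr hcnd
        simp only [if_pos hcnt, if_pos hcnd']
        rw [ih (i + 1) hrest [] (acc ++ [String.ofList (ns ++ [c])])]
        have hu : pvFA lets ns (c :: rest) = String.ofList (ns ++ [c]) :: pvFA lets [] rest := by
          simp only [pvFA]
          rw [if_pos hcnt, if_pos hcnd]
        rw [hu, List.append_assoc]
        rfl
      · have hcnd' : ¬ (i + 1 = L.length ∨ L.getD (i + 1) c ≠ c) := fun h => hcnd (hcond.mp h)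
        simp only [if_pos hcnt, if_neg hcnd']
        rw [ih (i + 1) hrest (ns ++ [c]) acc]
        have hu : pvFA lets ns (c :: rest) = pvFA lets (ns ++ [c]) rest := by
          simp only [pvFA]
          rw [if_pos hcnt, if_neg hcnd]
        rw [hu]
    · have hcnt : ¬ PySem.List.count lets c > 0 := by
        simp [PySem.List.count, List.count_pos_iff, hc]
      simp only [if_neg hcnt]
      rw [ih (i + 1) hrest ns acc]
      have hu : pvFA lets ns (c :: rest) = pvFA lets ns rest := by
        simp only [pvFA]
        rw [if_neg hcnt]
      rw [hu]

-- inside an allowed run, A accumulates until the run ends and then flushes the whole run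
theorem pvFA_run (lets : List Char) (c : Char) (hc : c ∈ lets) :
    ∀ (rest acc : List Char),
    pvFA lets acc (c :: rest)
      = String.ofList (acc ++ List.replicate (1 + pvRunLen c rest) c)
          :: pvFA lets [] (rest.drop (pvRunLen c rest)) := by
  intro rest
  induction rest with
  | nil => intro acc; simp [pvFA, hc, pvRunLen]
  | cons d rest' ih =>
    intro acc
    by_cases hd : d = c
    · subst hd
      have h1 : pvFA lets acc (d :: d :: rest') = pvFA lets (acc ++ [d]) (d :: rest') := by
        simp [pvFA, hc]
      rw [h1, ih (acc ++ [d])]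
      have hr : pvRunLen d (d :: rest') = 1 + pvRunLen d rest' := by simp [pvRunLen]
      rw [hr]
      have edrop : List.drop (1 + pvRunLen d rest') (d :: rest') = List.drop (pvRunLen d rest') rest' := by
        rw [Nat.add_comm, List.drop_succ_cons]
      have erep : List.replicate (1 + (1 + pvRunLen d rest')) d
          = [d] ++ List.replicate (1 + pvRunLen d rest') d := by
        simp [List.replicate_add]
      rw [edrop, erep]
      simp [List.append_assoc]
    · have h0 : pvRunLen c (d :: rest') = 0 := by simp [pvRunLen, hd]
      rw [h0]
      simp [pvFA, hc, hd]

-- a disallowed character's whole run is skipped without touching the accumulator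
theorem pvFA_skip (lets : List Char) (c : Char) (hc : c ∉ lets) :
    ∀ (rest : List Char),
    pvFA lets [] (c :: rest) = pvFA lets [] (rest.drop (pvRunLen c rest)) := by
  intro rest
  induction rest with
  | nil => simp [pvFA, hc, pvRunLen]
  | cons d rest' ih =>
    by_cases hd : d = c
    · subst hd
      have h1 : pvFA lets [] (d :: d :: rest') = pvFA lets [] (d :: rest') := by
        simp [pvFA, hc]
      rw [h1, ih]
      have hr : pvRunLen d (d :: rest') = 1 + pvRunLen d rest' := by simp [pvRunLen]
      rw [hr, Nat.add_comm 1 (pvRunLen d rest'), List.drop_succ_cons]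
    · have h0 : pvRunLen c (d :: rest') = 0 := by simp [pvRunLen, hd]
      rw [h0]
      simp [pvFA, hc]

theorem pvFA_eq_altGo (lets : List Char) :
    ∀ (l : List Char), pvFA lets [] l = pvAltGo (PySem.Set.ofList lets) l := by
  intro l
  induction hn : l.length using Nat.strong_induction_on generalizing l with
  | _ n ih =>
    match l with
    | [] => simp [pvFA, pvAltGo]
    | c :: rest =>
      have hmem : PySem.Set.contains (PySem.Set.ofList lets) c = true ↔ c ∈ lets := by
        simp [PySem.Set.contains, PySem.Set.mem_ofList]
      have hlt : (rest.drop (pvRunLen c rest)).length < n := by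
        simp only [← hn, List.length_cons, List.length_drop]
        omega
      have hih := ih _ hlt (rest.drop (pvRunLen c rest)) rfl
      by_cases hc : c ∈ lets
      · rw [pvFA_run lets c hc rest [], pvAltGo]
        simp only [if_pos (hmem.mpr hc)]
        rw [hih]
        simp
      · rw [pvFA_skip lets c hc rest, pvAltGo]
        have : PySem.Set.contains (PySem.Set.ofList lets) c ≠ true := fun h => hc (hmem.mp h)
        simp only [if_neg this]
        exact hih

-- ===== VERDICT (by name: the statement is the Claim_ definition above) =====
theorem getStreaks_spec : Claim_equal_getStreaks := by
  intro sequence letters _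
  unfold Spec_getStreaks getStreaks getStreaks_alt
  simp only []
  have h := pvFA_bridge sequence.toList letters.toList sequence.toList 0
    (by rw [List.drop_zero] : sequence.toList = List.drop 0 sequence.toList) [] []
  simp only [Nat.zero_add] at h
  rw [h]
  simp [pvFA_eq_altGo]
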